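-- pv_equiv track=rewrite | github.com/TNH-Labs/Property-Site-Scrapper | scrapper/test.py | find_matching_key
-- ===== SOURCE A (Python) =====
-- def find_matching_key(list1, list2):
--     matching_key = None
--     for key in list1:
--         for element in list2:
--             if key.lower() in element.lower():
--                 matching_key = key
--                 break
--         if matching_key:
--             break
--     return matching_key
--
-- list1 = ["Office", "Retail", "Industrial", "Land", "Special Purpose", "Restaurant", "Retail Space"]
--
-- list2 = ['Land', 'Flex', 'Industrial and Warehouse Space', 'Retail Space', 'Special Purpose', 'Restaurants', 'Hotel and Motel', 'Events', 'Office', 'Agriculture', 'Multi-Family', 'Health Care', 'Restaurant', 'Mixed Use', 'Office Space', 'Medical', 'Medical Offices', 'Industrial', 'Flex Space', 'Coworking', 'Retail', 'Sports and Entertainment', 'Coworking Space', 'Senior Housing', 'All Spaces']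
--
-- matching_key = find_matching_key(list1, list2)
-- ===== SOURCE B (Python) =====
-- def find_matching_key(list1, list2):
--     # One lowercased search blob (NUL-joined; NUL never occurs in the text),
--     # then a single scan of list1. Empty keys are skipped: they match nothing real.
--     blob = "\x00".join(e.lower() for e in list2)
--     return next((key for key in list1 if key and key.lower() in blob), None)
-- ===== Notes on version B (the rewrite author's own statement) =====
-- stated objective: idiomatic
-- what changed: B pre-lowercases and joins list2 into one search blob and makes a single generator pass over list1 with a substring test against it, instead of A's nested loop with a mutable accumulator and break logic; B deliberately skips empty keys.
-- intended difference: When list1 contains the empty string, list2 is nonempty and no nonempty key matches, A returns '' (the empty key trivially matches every element and survives as leftover loop state) while B returns None, the intended no-match answer. — e.g. on find_matching_key([""], ["x"]): A returns some "", B returns none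
import Mathlib
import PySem

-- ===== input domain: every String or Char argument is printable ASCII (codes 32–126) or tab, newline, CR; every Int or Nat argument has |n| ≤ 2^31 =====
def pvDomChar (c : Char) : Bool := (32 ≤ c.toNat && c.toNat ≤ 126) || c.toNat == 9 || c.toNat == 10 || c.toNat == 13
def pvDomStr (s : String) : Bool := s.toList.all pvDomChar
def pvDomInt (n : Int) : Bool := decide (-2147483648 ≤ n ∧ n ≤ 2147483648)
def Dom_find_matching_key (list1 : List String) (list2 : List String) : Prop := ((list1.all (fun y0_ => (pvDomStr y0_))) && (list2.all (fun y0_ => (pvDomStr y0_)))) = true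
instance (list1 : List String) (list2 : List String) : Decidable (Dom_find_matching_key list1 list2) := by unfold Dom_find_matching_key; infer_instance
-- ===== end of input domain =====

-- B replaces A's nested loop/accumulator/break logic by one lowercased NUL-joined
-- search blob over list2 and a single find-first pass over list1 (skipping empty keys).

-- ===== PORT A =====
-- Python truthiness of `matching_key` (None or a str)
def pvTruthy (mk : Option String) : Bool :=
  match mk with
  | none => false
  | some s => !(s == "")

-- `for element in list2: if key.lower() in element.lower(): matching_key = key; break`
def fmkInner (key : String) (list2 : List String) (mk : Option String) : Option String :=
  match list2 with
  | [] => mk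
  | e :: rest =>
    if PySem.Str.isIn (PySem.Str.lower key) (PySem.Str.lower e) then some key
    else fmkInner key rest mk

-- the outer `for key in list1` loop with `if matching_key: break`
def fmkOuter (mk : Option String) (list1 : List String) (list2 : List String) : Option String :=
  match list1 with
  | [] => mk
  | key :: rest =>
    let mk' := fmkInner key list2 mk
    if pvTruthy mk' then mk' else fmkOuter mk' rest list2

def find_matching_key (list1 : List String) (list2 : List String) : Option String :=
  fmkOuter none list1 list2

-- ===== PORT B =====
def find_matching_key_alt (list1 : List String) (list2 : List String) : Option String :=
  let blob := PySem.Str.join "\x00" (list2.map PySem.Str.lower)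
  list1.find? (fun key => !(key == "") && PySem.Str.isIn (PySem.Str.lower key) blob)

-- ===== PRECONDITION & SPEC =====
-- When list1 contains "" , list2 is nonempty and no nonempty key matches, A returns ""
-- (the empty key trivially matches every element and survives as leftover loop state),
-- while B returns none, the intended no-match answer.
def D_find_matching_key (list1 : List String) (list2 : List String) : Prop :=
  "" ∈ list1 ∧ list2 ≠ [] ∧
    ∀ k ∈ list1, k ≠ "" → ∀ e ∈ list2,
      ¬ (PySem.Str.lower k).toList <:+: (PySem.Str.lower e).toList
instance (list1 : List String) (list2 : List String) : Decidable (D_find_matching_key list1 list2) := by unfold D_find_matching_key; infer_instance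

def Spec_find_matching_key (list1 : List String) (list2 : List String) (out : Option String) : Prop := ¬ D_find_matching_key list1 list2 → out = find_matching_key_alt list1 list2
instance (list1 : List String) (list2 : List String) (out : Option String) : Decidable (Spec_find_matching_key list1 list2 out) := by unfold Spec_find_matching_key; infer_instance

def pvDiffWitness_find_matching_key : List String × List String := ([""], ["x"])
def pvDiffWitnessOut_find_matching_key : (Option String) × (Option String) := (some "", none)

-- ===== CLAIM (what is proved, stated in full; the proofs are below) =====
def Claim_unchanged_find_matching_key : Prop := ∀ (list1 : List String) (list2 : List String), Dom_find_matching_key list1 list2 → Spec_find_matching_key list1 list2 (find_matching_key list1 list2)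
def Claim_changed_find_matching_key : Prop := Dom_find_matching_key (pvDiffWitness_find_matching_key.1) (pvDiffWitness_find_matching_key.2) ∧ D_find_matching_key (pvDiffWitness_find_matching_key.1) (pvDiffWitness_find_matching_key.2) ∧ find_matching_key (pvDiffWitness_find_matching_key.1) (pvDiffWitness_find_matching_key.2) = pvDiffWitnessOut_find_matching_key.1 ∧ find_matching_key_alt (pvDiffWitness_find_matching_key.1) (pvDiffWitness_find_matching_key.2) = pvDiffWitnessOut_find_matching_key.2 ∧ pvDiffWitnessOut_find_matching_key.1 ≠ pvDiffWitnessOut_find_matching_key.2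
def Claim_exact_find_matching_key : Prop := ∀ (list1 : List String) (list2 : List String), Dom_find_matching_key list1 list2 → D_find_matching_key list1 list2 → find_matching_key list1 list2 ≠ find_matching_key_alt list1 list2

-- ===== LEMMAS AND PROOFS =====

-- the predicate A effectively tests on a nonempty key
def fmkMatches (key : String) (list2 : List String) : Bool :=
  list2.any (fun e => PySem.Str.isIn (PySem.Str.lower key) (PySem.Str.lower e))

theorem fmkInner_eq (key : String) (list2 : List String) (mk : Option String) :
    fmkInner key list2 mk = if fmkMatches key list2 then some key else mk := by
  induction list2 with
  | nil => simp [fmkInner, fmkMatches]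
  | cons e rest ih =>
    by_cases h : PySem.Chars.isIn (PySem.Chars.lower key.toList) (PySem.Chars.lower e.toList) = true
    · simp [fmkInner, fmkMatches, h]
    · simp [fmkInner, fmkMatches, h, ih]

theorem fmkMatches_empty (list2 : List String) :
    fmkMatches "" list2 = !list2.isEmpty := by
  cases list2 with
  | nil => simp [fmkMatches]
  | cons e rest =>
    simp [fmkMatches, PySem.Chars.lower, PySem.Chars.isIn_nil]

-- characterisation of A's outer loop for a falsy accumulator
theorem fmkOuter_char (list1 : List String) (list2 : List String) (mk : Option String)
    (hmk : pvTruthy mk = false) :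
    fmkOuter mk list1 list2 =
      match list1.find? (fun k => !(k == "") && fmkMatches k list2) with
      | some k => some k
      | none => if "" ∈ list1 ∧ list2 ≠ [] then some "" else mk := by
  induction list1 generalizing mk with
  | nil => simp [fmkOuter]
  | cons key rest ih =>
    by_cases hm : fmkMatches key list2 = true
    · by_cases hk : key = ""
      · subst hk
        have h2 : list2 ≠ [] := by
          intro h; rw [h] at hm; simp [fmkMatches] at hm
        have e1 : fmkOuter mk ("" :: rest) list2 = fmkOuter (some "") rest list2 := by
          simp [fmkOuter, fmkInner_eq, hm, pvTruthy]
        rw [e1, ih _ (by decide)]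
        simp only [List.find?_cons]
        have hp : (!(("" : String) == "") && fmkMatches "" list2) = false := by simp
        rw [hp]
        cases hfind : rest.find? (fun k => !(k == "") && fmkMatches k list2) with
        | some k => simp
        | none => simp [h2]
      · have e1 : fmkOuter mk (key :: rest) list2 = some key := by
          simp [fmkOuter, fmkInner_eq, hm, pvTruthy, hk]
        rw [e1]
        simp only [List.find?_cons]
        have hp : (!(key == "") && fmkMatches key list2) = true := by simp [hk, hm]
        rw [hp]
    · have hm' : fmkMatches key list2 = false := by simpa using hm
      have e1 : fmkOuter mk (key :: rest) list2 = fmkOuter mk rest list2 := by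
        simp [fmkOuter, fmkInner_eq, hm', hmk]
      rw [e1, ih _ hmk]
      simp only [List.find?_cons]
      have hp : (!(key == "") && fmkMatches key list2) = false := by simp [hm']
      rw [hp]
      cases hfind : rest.find? (fun k => !(k == "") && fmkMatches k list2) with
      | some k => simp
      | none =>
        simp only []
        by_cases hk : key = ""
        · subst hk
          have h2 : list2 = [] := by
            cases list2 with
            | nil => rfl
            | cons a b => rw [fmkMatches_empty] at hm'; simp at hm'
          simp [h2]
        · have hiff : ("" ∈ key :: rest ∧ list2 ≠ []) ↔ ("" ∈ rest ∧ list2 ≠ []) := by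
            constructor
            · rintro ⟨h1, h2⟩
              cases h1 with
              | head => exact absurd rfl hk
              | tail _ h => exact ⟨h, h2⟩
            · rintro ⟨h1, h2⟩; exact ⟨List.mem_cons_of_mem _ h1, h2⟩
          rw [if_congr hiff rfl rfl]

-- a string all of whose chars are in Dom keeps NUL out of its lowercasing
theorem lower_noNul (s : String) (hs : pvDomStr s = true) :
    '\x00' ∉ (PySem.Str.lower s).toList := by
  rw [PySem.Str.toList_lower]
  simp only [PySem.Chars.lower, List.mem_map]
  rintro ⟨c, hc, heq⟩
  have hdom : pvDomChar c = true := by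
    rw [pvDomStr] at hs
    exact List.all_eq_true.mp hs c hc
  have hc9 : 9 ≤ c.toNat := by
    simp only [pvDomChar, Bool.or_eq_true, Bool.and_eq_true, decide_eq_true_eq, beq_iff_eq] at hdom
    omega
  have hne : (PySem.Chars.lowerChar c).toNat ≠ 0 := by
    simp only [PySem.Chars.lowerChar]
    split
    · rename_i hup
      simp only [PySem.Chars.isupper, Bool.and_eq_true, decide_eq_true_eq] at hup
      obtain ⟨h1, h2⟩ := hup
      rw [Char.le_def] at h1 h2
      have h1' : 65 ≤ c.toNat := h1
      have h2' : c.toNat ≤ 90 := h2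
      rw [Char.toNat_ofNat, if_pos (Or.inl (by omega))]
      omega
    · omega
  apply hne
  rw [heq]
  rfl

-- boundary step: a nonempty sep-free word infix of `a ++ sep :: b` is infix of a or of b
theorem infix_append_sep {k a b : List Char} (sep : Char)
    (hk : k ≠ []) (hsep : sep ∉ k) (h : k <:+: a ++ sep :: b) :
    k <:+: a ∨ k <:+: b := by
  obtain ⟨s, t, hst⟩ := h
  rw [List.append_assoc] at hst
  rcases List.append_eq_append_iff.mp hst with ⟨as, ha, h1⟩ | ⟨bs, _, h2⟩
  · rcases List.append_eq_append_iff.mp h1 with ⟨ds, has, _⟩ | ⟨bs, hkbs, h3⟩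
    · left
      exact ⟨s, ds, by rw [ha, has, List.append_assoc]⟩
    · cases bs with
      | nil =>
        left
        rw [List.append_nil] at hkbs
        exact ⟨s, [], by rw [ha, ← hkbs, List.append_nil]⟩
      | cons x bs' =>
        exfalso
        apply hsep
        have hx : sep = x := by
          rw [List.cons_append] at h3
          exact (List.cons_eq_cons.mp h3).1
        rw [hkbs, hx]
        exact List.mem_append_right _ List.mem_cons_self
  · cases bs with
    | nil =>
      exfalso
      rw [List.nil_append] at h2
      apply hsep
      cases k with
      | nil => exact absurd rfl hk
      | cons y k' =>
        have : sep = y := by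
          have := h2
          rw [List.cons_append] at this
          exact (List.cons_eq_cons.mp this).1
        rw [this]; exact List.mem_cons_self
    | cons x bs' =>
      right
      have hb : b = bs' ++ (k ++ t) := by
        have := h2
        rw [List.cons_append] at this
        exact (List.cons_eq_cons.mp this).2
      exact ⟨bs', t, by rw [hb, List.append_assoc]⟩

-- a nonempty sep-free word is infix of a sep-joined list iff it is infix of some part
theorem infix_join_iff (k : List Char) (sep : Char) (parts : List (List Char))
    (hk : k ≠ []) (hsep : sep ∉ k) :
    k <:+: PySem.Chars.join [sep] parts ↔ ∃ p ∈ parts, k <:+: p := by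
  induction parts with
  | nil =>
    rw [PySem.Chars.join_nil]
    constructor
    · intro h
      exact absurd (List.eq_nil_of_infix_nil h) hk
    · rintro ⟨p, hp, _⟩; simp at hp
  | cons p rest ih =>
    cases rest with
    | nil =>
      rw [PySem.Chars.join_singleton]
      simp
    | cons q rest' =>
      rw [PySem.Chars.join_cons_cons]
      constructor
      · intro h
        have h' : k <:+: p ++ sep :: PySem.Chars.join [sep] (q :: rest') := by
          rw [List.append_assoc] at h
          simpa using h
        rcases infix_append_sep sep hk hsep h' with h1 | h2
        · exact ⟨p, List.mem_cons_self, h1⟩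
        · obtain ⟨r, hr, hkr⟩ := ih.mp h2
          exact ⟨r, List.mem_cons_of_mem _ hr, hkr⟩
      · rintro ⟨r, hr, hkr⟩
        cases hr with
        | head =>
          refine hkr.trans ⟨[], [sep] ++ PySem.Chars.join [sep] (q :: rest'), ?_⟩
          simp
        | tail _ hr' =>
          refine (ih.mpr ⟨r, hr', hkr⟩).trans ⟨p ++ [sep], [], ?_⟩
          simp

-- on Dom inputs, B's blob test on a nonempty key equals A's per-element test
theorem blob_eq_matches (key : String) (list2 : List String)
    (hkey : pvDomStr key = true) (hne : key ≠ "") :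
    PySem.Str.isIn (PySem.Str.lower key) (PySem.Str.join "\x00" (list2.map PySem.Str.lower))
      = fmkMatches key list2 := by
  have hkne : (PySem.Str.lower key).toList ≠ [] := by
    rw [PySem.Str.toList_lower]
    simp only [PySem.Chars.lower]
    intro h
    apply hne
    have : key.toList = [] := by simpa using h
    exact String.toList_eq_nil_iff.mp this
  have hsep : '\x00' ∉ (PySem.Str.lower key).toList := lower_noNul key hkey
  rw [PySem.Str.isIn_eq, PySem.Str.toList_join]
  have hjoin : ("\x00" : String).toList = ['\x00'] := by decide
  rw [hjoin]
  have hmaps : (list2.map PySem.Str.lower).map String.toList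
      = list2.map (fun e => (PySem.Str.lower e).toList) := by
    rw [List.map_map]; rfl
  rw [hmaps]
  by_cases hmem : ∃ e ∈ list2, (PySem.Str.lower key).toList <:+: (PySem.Str.lower e).toList
  · obtain ⟨e, he, hinf⟩ := hmem
    have hL : (PySem.Chars.isIn (PySem.Str.lower key).toList
        (PySem.Chars.join ['\x00'] (list2.map (fun e => (PySem.Str.lower e).toList)))) = true := by
      rw [PySem.Chars.isIn_iff_infix, infix_join_iff _ _ _ hkne hsep]
      exact ⟨(PySem.Str.lower e).toList, List.mem_map_of_mem he, hinf⟩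
    have hR : fmkMatches key list2 = true := by
      simp only [fmkMatches, List.any_eq_true]
      refine ⟨e, he, ?_⟩
      rw [PySem.Str.isIn_eq, PySem.Chars.isIn_iff_infix]
      exact hinf
    rw [hL, hR]
  · have hL : (PySem.Chars.isIn (PySem.Str.lower key).toList
        (PySem.Chars.join ['\x00'] (list2.map (fun e => (PySem.Str.lower e).toList)))) = false := by
      rw [Bool.eq_false_iff]
      intro hc
      rw [PySem.Chars.isIn_iff_infix, infix_join_iff _ _ _ hkne hsep] at hc
      obtain ⟨p, hp, hinf⟩ := hc
      obtain ⟨e, he, rfl⟩ := List.mem_map.mp hp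
      exact hmem ⟨e, he, hinf⟩
    have hR : fmkMatches key list2 = false := by
      rw [Bool.eq_false_iff]
      intro hc
      simp only [fmkMatches, List.any_eq_true] at hc
      obtain ⟨e, he, hin⟩ := hc
      rw [PySem.Str.isIn_eq, PySem.Chars.isIn_iff_infix] at hin
      exact hmem ⟨e, he, hin⟩
    rw [hL, hR]

theorem find?_congr_mem {α : Type} (p q : α → Bool) (l : List α)
    (h : ∀ x ∈ l, p x = q x) : l.find? p = l.find? q := by
  induction l with
  | nil => rfl
  | cons a t ih =>
    simp only [List.find?_cons]
    rw [h a List.mem_cons_self]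
    cases q a
    · exact ih fun x hx => h x (List.mem_cons_of_mem _ hx)
    · rfl

theorem alt_eq_find? (list1 : List String) (list2 : List String)
    (hd : Dom_find_matching_key list1 list2) :
    find_matching_key_alt list1 list2
      = list1.find? (fun k => !(k == "") && fmkMatches k list2) := by
  unfold find_matching_key_alt
  apply find?_congr_mem
  intro k hk
  rw [Dom_find_matching_key, Bool.and_eq_true] at hd
  by_cases hne : k = ""
  · subst hne; simp
  · have hkd : pvDomStr k = true := List.all_eq_true.mp hd.1 k hk
    rw [blob_eq_matches k list2 hkd hne]

-- no good key found ↔ D_'s third clause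
theorem find?_none_iff (list1 : List String) (list2 : List String) :
    list1.find? (fun k => !(k == "") && fmkMatches k list2) = none ↔
      ∀ k ∈ list1, k ≠ "" → ∀ e ∈ list2,
        ¬ (PySem.Str.lower k).toList <:+: (PySem.Str.lower e).toList := by
  rw [List.find?_eq_none]
  constructor
  · intro h k hk hne e he hinf
    apply h k hk
    have hm : fmkMatches k list2 = true := by
      simp only [fmkMatches, List.any_eq_true]
      refine ⟨e, he, ?_⟩
      rw [PySem.Str.isIn_eq, PySem.Chars.isIn_iff_infix]
      exact hinf
    simp [hne, hm]
  · intro h k hk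
    by_cases hne : k = ""
    · subst hne; simp
    · have hm : fmkMatches k list2 = false := by
        rw [Bool.eq_false_iff]
        intro hc
        simp only [fmkMatches, List.any_eq_true] at hc
        obtain ⟨e, he, hin⟩ := hc
        rw [PySem.Str.isIn_eq, PySem.Chars.isIn_iff_infix] at hin
        exact h k hk hne e he hin
      simp [hm]

-- ===== VERDICT (by name: the statement is the Claim_ definition above) =====
theorem find_matching_key_spec : Claim_unchanged_find_matching_key := by
  intro list1 list2 hd hnd
  unfold find_matching_key
  rw [fmkOuter_char list1 list2 none (by decide), alt_eq_find? list1 list2 hd]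
  cases hfind : list1.find? (fun k => !(k == "") && fmkMatches k list2) with
  | some k => rfl
  | none =>
    simp only []
    have h3 := (find?_none_iff list1 list2).mp hfind
    by_cases hc : "" ∈ list1 ∧ list2 ≠ []
    · exact absurd ⟨hc.1, hc.2, h3⟩ hnd
    · rw [if_neg hc]

theorem find_matching_key_changed : Claim_changed_find_matching_key := by
  unfold Claim_changed_find_matching_key; decide

theorem find_matching_key_tight : Claim_exact_find_matching_key := by
  intro list1 list2 hd hD
  obtain ⟨h1, h2, h3⟩ := hD
  unfold find_matching_key
  rw [fmkOuter_char list1 list2 none (by decide), alt_eq_find? list1 list2 hd]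
  have hfind : list1.find? (fun k => !(k == "") && fmkMatches k list2) = none :=
    (find?_none_iff list1 list2).mpr h3
  rw [hfind]
  simp [h1, h2]
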